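-- pv_equiv track=rewrite | github.com/dorin133/ANLP | yarin_functions1_2.py | identify_assistant_tokens
-- ===== SOURCE A (Python) =====
-- def identify_assistant_tokens(tokens):
--     """
--     Identifies which tokens appear after the word 'assistant' in a sequence.
--
--     Args:
--         tokens (list): A list of token strings.
--
--     Returns:
--         list: A boolean mask where True indicates tokens after 'assistant',
--               and False indicates tokens before or including 'assistant'.
--     """
--     assistant_mask = [False] * len(tokens)
--
--     # Find the index of 'assistant' token
--     assistant_idx = -1
--     for i, token in enumerate(tokens):
--         if token.lower() == 'assistant':
--             assistant_idx = i
--             break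
--
--     # If 'assistant' is found, mark all subsequent tokens as True
--     if assistant_idx != -1:
--         for i in range(assistant_idx + 1, len(tokens)):
--             assistant_mask[i] = True
--
--     return assistant_mask
-- ===== SOURCE B (Python) =====
-- def identify_assistant_tokens(tokens):
--     """Single linear pass with a 'seen' flag: append the flag first, then flip it
--     at the first (case-insensitive) 'assistant' token."""
--     mask = []
--     seen = False
--     for token in tokens:
--         mask.append(seen)
--         if not seen and token.lower() == 'assistant':
--             seen = True
--     return mask
-- ===== Notes on version B (the rewrite author's own statement) =====
-- stated objective: simpler
-- what changed: Replaces A's three phases (preallocate a False mask, scan for the first 'assistant' index, then a second loop writing True into a suffix range) by one linear pass that appends a running 'seen' flag and flips it after the first match.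
import Mathlib
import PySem

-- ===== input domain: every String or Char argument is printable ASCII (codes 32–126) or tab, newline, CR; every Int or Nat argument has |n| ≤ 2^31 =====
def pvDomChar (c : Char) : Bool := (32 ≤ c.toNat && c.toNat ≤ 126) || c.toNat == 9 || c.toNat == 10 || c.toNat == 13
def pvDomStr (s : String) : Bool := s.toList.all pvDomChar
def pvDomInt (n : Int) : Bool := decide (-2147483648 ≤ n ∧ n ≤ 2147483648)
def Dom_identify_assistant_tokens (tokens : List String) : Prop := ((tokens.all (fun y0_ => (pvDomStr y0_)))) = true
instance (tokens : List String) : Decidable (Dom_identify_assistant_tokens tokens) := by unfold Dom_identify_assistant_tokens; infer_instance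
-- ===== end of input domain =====

-- B changes the decomposition only: one pass with a 'seen' flag instead of A's
-- mask-preallocation + index search + suffix-filling range loop (objective: simpler).

-- ===== PORT A =====
-- the 'for i, token in enumerate(tokens): if token.lower() == 'assistant': ...; break' search loop
def pvFindAssistant : List String → Int → Int
  | [], _ => -1
  | t :: ts, i => if PySem.Str.lower t = "assistant" then i else pvFindAssistant ts (i + 1)

def identify_assistant_tokens (tokens : List String) : List Bool :=
  let assistant_mask := List.replicate tokens.length false
  let assistant_idx := pvFindAssistant tokens 0
  if assistant_idx ≠ -1 then
    (PySem.List.pyRange (assistant_idx + 1) (tokens.length : Int) 1).foldl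
      (fun m i => m.set i.toNat true) assistant_mask
  else assistant_mask

-- ===== PORT B =====
def identify_assistant_tokens_alt (tokens : List String) : List Bool :=
  (tokens.foldl
    (fun (st : List Bool × Bool) token =>
      (st.1 ++ [st.2],
       if st.2 = false ∧ PySem.Str.lower token = "assistant" then true else st.2))
    ([], false)).1

-- ===== PRECONDITION & SPEC =====
def Spec_identify_assistant_tokens (tokens : List String) (out : List Bool) : Prop := out = identify_assistant_tokens_alt tokens
instance (tokens : List String) (out : List Bool) : Decidable (Spec_identify_assistant_tokens tokens out) := by unfold Spec_identify_assistant_tokens; infer_instance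

-- ===== CLAIM (what is proved, stated in full; the proofs are below) =====
def Claim_equal_identify_assistant_tokens : Prop := ∀ (tokens : List String), Dom_identify_assistant_tokens tokens → Spec_identify_assistant_tokens tokens (identify_assistant_tokens tokens)

-- ===== LEMMAS AND PROOFS =====

-- B's loop step
def pvBStep (st : List Bool × Bool) (token : String) : List Bool × Bool :=
  (st.1 ++ [st.2],
   if st.2 = false ∧ PySem.Str.lower token = "assistant" then true else st.2)

theorem pvB_foldl_shift (ts : List String) (acc : List Bool) (seen : Bool) :
    (ts.foldl pvBStep (acc, seen)).1 = acc ++ (ts.foldl pvBStep ([], seen)).1 := by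
  induction ts generalizing acc seen with
  | nil => simp
  | cons t ts ih =>
    simp only [List.foldl_cons, pvBStep]
    rw [ih, ih ([] ++ [seen])]
    simp

theorem pvB_foldl_true (ts : List String) :
    (ts.foldl pvBStep ([], true)).1 = List.replicate ts.length true := by
  induction ts with
  | nil => simp
  | cons t ts ih =>
    simp only [List.foldl_cons, pvBStep]
    rw [pvB_foldl_shift]
    simp [ih, List.replicate_succ]

theorem pvB_cons (t : String) (ts : List String) :
    identify_assistant_tokens_alt (t :: ts) =
      false :: (if PySem.Str.lower t = "assistant" then List.replicate ts.length true
                else identify_assistant_tokens_alt ts) := by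
  show ((t :: ts).foldl pvBStep ([], false)).1 = _
  simp only [List.foldl_cons, pvBStep]
  by_cases h : PySem.Str.lower t = "assistant"
  · simp only [h, and_true, if_pos trivial]
    rw [pvB_foldl_shift]
    simp [pvB_foldl_true]
  · simp only [h, and_false, if_false]
    rw [pvB_foldl_shift]
    rfl

-- pvFindAssistant facts
theorem pvFind_shift (ts : List String) (i : Int) (hi : 0 ≤ i) :
    pvFindAssistant ts (i + 1) =
      if pvFindAssistant ts i = -1 then -1 else pvFindAssistant ts i + 1 := by
  induction ts generalizing i with
  | nil => simp [pvFindAssistant]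
  | cons t ts ih =>
    simp only [pvFindAssistant]
    by_cases h : PySem.Str.lower t = "assistant"
    · simp only [if_pos h]
      have : ¬ (i = -1) := by omega
      simp [this]
    · simp only [if_neg h]
      exact ih (i + 1) (by omega)

theorem pvFind_bounds (ts : List String) (i : Int) (hi : 0 ≤ i) :
    pvFindAssistant ts i = -1 ∨ (i ≤ pvFindAssistant ts i ∧ pvFindAssistant ts i < i + ts.length) := by
  induction ts generalizing i with
  | nil => simp [pvFindAssistant]
  | cons t ts ih =>
    simp only [pvFindAssistant]
    by_cases h : PySem.Str.lower t = "assistant"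
    · simp only [if_pos h]
      right; simp
    · simp only [if_neg h]
      rcases ih (i + 1) (by omega) with h' | h'
      · left; exact h'
      · right; simp only [List.length_cons]; push_cast; omega

-- filling a suffix range of the mask with True
theorem pvSetRange (k : Nat) (m : List Bool) (a n : Nat) (hn : m.length = n)
    (ha : n - a = k) (hle : a ≤ n) :
    (PySem.List.pyRange (a : Int) (n : Int) 1).foldl (fun acc i => acc.set i.toNat true) m =
      m.take a ++ List.replicate (n - a) true := by
  induction k generalizing m a with
  | zero =>
    have h : a = n := by omega
    subst h
    rw [PySem.List.pyRange_one_eq_nil (by simp)]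
    simp [hn]
  | succ k ih =>
    have hlt : a < n := by omega
    rw [PySem.List.pyRange_one_cons (by exact_mod_cast hlt)]
    simp only [List.foldl_cons, Int.toNat_natCast]
    have hcast : ((a : Int) + 1) = ((a + 1 : Nat) : Int) := by push_cast; ring
    rw [hcast, ih (m.set a true) (a + 1) (by simp [hn]) (by omega) (by omega)]
    have hlt' : a < m.length := by omega
    have hset : m.set a true = m.take a ++ true :: m.drop (a + 1) :=
      List.set_eq_take_cons_drop true hlt'
    have htake : (m.set a true).take (a + 1) = m.take a ++ [true] := by
      rw [hset, List.take_append]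
      have h1 : (m.take a).length = a := by simp; omega
      rw [List.take_of_length_le (by omega), h1]
      simp
    rw [htake]
    have h2 : n - a = (n - (a + 1)) + 1 := by omega
    rw [h2, List.replicate_succ]
    simp

-- closed form for A
theorem pvA_closed (ts : List String) :
    identify_assistant_tokens ts =
      (if pvFindAssistant ts 0 = -1 then List.replicate ts.length false
       else List.replicate ((pvFindAssistant ts 0).toNat + 1) false ++
            List.replicate (ts.length - (pvFindAssistant ts 0).toNat - 1) true) := by
  unfold identify_assistant_tokens
  by_cases h : pvFindAssistant ts 0 = -1
  · simp [h]
  · rcases pvFind_bounds ts 0 le_rfl with h' | ⟨h1, h2⟩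
    · exact absurd h' h
    · simp only [ite_not, if_neg h]
      set k := pvFindAssistant ts 0 with hk
      have hk0 : k.toNat + 1 ≤ ts.length := by omega
      have hcast : k + 1 = ((k.toNat + 1 : Nat) : Int) := by omega
      rw [hcast, pvSetRange (ts.length - (k.toNat + 1)) _ _ _ (by simp) rfl hk0]
      simp [List.take_replicate, Nat.min_eq_left hk0]
      omega

-- A's recursion, derived from the closed form
theorem pvA_cons (t : String) (ts : List String) :
    identify_assistant_tokens (t :: ts) =
      false :: (if PySem.Str.lower t = "assistant" then List.replicate ts.length true
                else identify_assistant_tokens ts) := by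
  rw [pvA_closed, pvA_closed]
  by_cases h : PySem.Str.lower t = "assistant"
  · have hf : pvFindAssistant (t :: ts) 0 = 0 := by simp [pvFindAssistant, h]
    simp [hf, if_pos h, List.replicate_succ]
  · have hf : pvFindAssistant (t :: ts) 0 = pvFindAssistant ts 1 := by
      simp [pvFindAssistant, h]
    have hsh := pvFind_shift ts 0 le_rfl
    norm_num at hsh
    rw [hf, hsh]
    by_cases h0 : pvFindAssistant ts 0 = -1
    · simp [h0, if_neg h, List.replicate_succ]
    · rcases pvFind_bounds ts 0 le_rfl with h' | ⟨h1, h2⟩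
      · exact absurd h' h0
      · set k := pvFindAssistant ts 0 with hk
        have hne : ¬ (k + 1 = -1) := by omega
        simp only [if_neg h0, if_neg hne, if_neg h]
        have h3 : (k + 1).toNat = k.toNat + 1 := by omega
        simp only [List.length_cons, h3]
        have h4 : ts.length + 1 - (k.toNat + 1) - 1 = ts.length - k.toNat - 1 := by omega
        rw [h4, List.replicate_succ]
        simp

theorem pvAB (ts : List String) :
    identify_assistant_tokens ts = identify_assistant_tokens_alt ts := by
  induction ts with
  | nil => rfl
  | cons t ts ih => rw [pvA_cons, pvB_cons, ih]

-- ===== VERDICT (by name: the statement is the Claim_ definition above) =====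
theorem identify_assistant_tokens_spec : Claim_equal_identify_assistant_tokens := by
  intro tokens _
  exact pvAB tokens
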